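-- pv_equiv track=rewrite | github.com/Code-With-TalhaBhai/python-classes | DSA/Leetcode_General/lc_2094.py | findEvenNumbers1
-- ===== SOURCE A (Python) =====
-- def findEvenNumbers1(digits):
--     n = len(digits)
--     final = set()
--
--     for i in range(n):
--         if digits[i] == 0:
--             continue
--         for j in range(n):
--             if i == j:
--                 continue
--             for k in range(n):
--                 if i == k or j == k:
--                     continue
--
--                 num = digits[i] * 100 + digits[j] * 10 + digits[k]
--                 if num % 2 == 0:
--                     final.add(num)
--     final = sorted(final)
--     return final
-- ===== SOURCE B (Python) =====
-- def findEvenNumbers1(digits):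
--     # Count each digit value once, then enumerate ordered triples of DISTINCT VALUES
--     # (not index triples), checking multiset feasibility against the counts.
--     cnt = {}
--     for d in digits:
--         cnt[d] = cnt.get(d, 0) + 1
--     final = set()
--     for a in cnt:
--         if a == 0:
--             continue
--         for b in cnt:
--             if cnt[b] - (1 if b == a else 0) < 1:
--                 continue
--             for c in cnt:
--                 if cnt[c] - (1 if c == a else 0) - (1 if c == b else 0) < 1:
--                     continue
--                 num = a * 100 + b * 10 + c
--                 if num % 2 == 0:
--                     final.add(num)
--     return sorted(final)
-- ===== Notes on version B (the rewrite author's own statement) =====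
-- stated objective: alternative
-- what changed: A scans all ordered triples of distinct indices; B builds a value->count dictionary in one pass and scans ordered triples of DISTINCT VALUES, testing multiset feasibility against the counts, so duplicate digits are never re-enumerated.
import Mathlib
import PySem

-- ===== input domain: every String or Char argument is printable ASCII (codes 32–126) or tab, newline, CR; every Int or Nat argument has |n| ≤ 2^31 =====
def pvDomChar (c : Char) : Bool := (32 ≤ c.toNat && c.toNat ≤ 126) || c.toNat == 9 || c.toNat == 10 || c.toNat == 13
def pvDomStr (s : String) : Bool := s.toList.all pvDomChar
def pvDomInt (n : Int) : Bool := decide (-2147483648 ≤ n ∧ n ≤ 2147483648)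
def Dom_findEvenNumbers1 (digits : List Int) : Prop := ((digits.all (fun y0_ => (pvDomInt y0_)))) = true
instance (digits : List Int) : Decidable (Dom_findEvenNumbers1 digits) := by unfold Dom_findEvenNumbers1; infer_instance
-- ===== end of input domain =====

-- B replaces A's cubic scan over index triples by a frequency map scanned over
-- ordered triples of DISTINCT values with a multiset-feasibility test (objective: alternative).

-- ===== PORT A =====
def findEvenNumbers1 (digits : List Int) : List Int :=
  let n : Int := digits.length
  let final : PySem.Set Int :=
    (PySem.List.pyRange 0 n 1).foldl (fun s1 i =>
      if PySem.List.pyGetD digits i 0 = 0 then s1 else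
      (PySem.List.pyRange 0 n 1).foldl (fun s2 j =>
        if i = j then s2 else
        (PySem.List.pyRange 0 n 1).foldl (fun s3 k =>
          if i = k ∨ j = k then s3 else
          let num := PySem.List.pyGetD digits i 0 * 100 + PySem.List.pyGetD digits j 0 * 10 + PySem.List.pyGetD digits k 0
          if PySem.Int.mod num 2 = 0 then PySem.Set.add s3 num else s3) s2) s1)
      PySem.Set.empty
  PySem.List.sorted final (fun x => x) false

-- ===== PORT B =====
-- cnt[b] / cnt[c] on a key of cnt is ported as getD _ 0 (exact: the key is present).
def findEvenNumbers1_alt (digits : List Int) : List Int :=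
  let cnt : PySem.Dict Int Int :=
    digits.foldl (fun d x => d.insert x (d.getD x 0 + 1)) PySem.Dict.empty
  let final : PySem.Set Int :=
    cnt.keys.foldl (fun s1 a =>
      if a = 0 then s1 else
      cnt.keys.foldl (fun s2 b =>
        if cnt.getD b 0 - (if b = a then 1 else 0) < 1 then s2 else
        cnt.keys.foldl (fun s3 c =>
          if cnt.getD c 0 - (if c = a then 1 else 0) - (if c = b then 1 else 0) < 1 then s3 else
          let num := a * 100 + b * 10 + c
          if PySem.Int.mod num 2 = 0 then PySem.Set.add s3 num else s3) s2) s1)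
      PySem.Set.empty
  PySem.List.sorted final (fun x => x) false

-- ===== PRECONDITION & SPEC =====
def Spec_findEvenNumbers1 (digits : List Int) (out : List Int) : Prop := out = findEvenNumbers1_alt digits
instance (digits : List Int) (out : List Int) : Decidable (Spec_findEvenNumbers1 digits out) := by unfold Spec_findEvenNumbers1; infer_instance

-- ===== CLAIM (what is proved, stated in full; the proofs are below) =====
def Claim_equal_findEvenNumbers1 : Prop := ∀ (digits : List Int), Dom_findEvenNumbers1 digits → Spec_findEvenNumbers1 digits (findEvenNumbers1 digits)

-- ===== LEMMAS AND PROOFS =====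

-- membership through a fold that only ever adds elements
theorem pv_mem_foldl_iff {β : Type} (f : List Int → β → List Int) (Q : β → Int → Prop)
    (hf : ∀ s b x, x ∈ f s b ↔ x ∈ s ∨ Q b x) :
    ∀ (l : List β) (s : List Int) (x : Int), x ∈ l.foldl f s ↔ x ∈ s ∨ ∃ b ∈ l, Q b x := by
  intro l
  induction l with
  | nil => simp
  | cons b l ih =>
    intro s x
    rw [List.foldl_cons, ih, hf]
    simp only [List.mem_cons]
    constructor
    · rintro ((h | h) | ⟨b', hb', hq⟩)
      · exact Or.inl h
      · exact Or.inr ⟨b, Or.inl rfl, h⟩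
      · exact Or.inr ⟨b', Or.inr hb', hq⟩
    · rintro (h | ⟨b', (rfl | hb'), hq⟩)
      · exact Or.inl (Or.inl h)
      · exact Or.inl (Or.inr hq)
      · exact Or.inr ⟨b', hb', hq⟩

theorem pv_nodup_foldl {β : Type} (f : List Int → β → List Int)
    (hf : ∀ s b, s.Nodup → (f s b).Nodup) :
    ∀ (l : List β) (s : List Int), s.Nodup → (l.foldl f s).Nodup := by
  intro l
  induction l with
  | nil => intro s h; simpa using h
  | cons b l ih => intro s h; rw [List.foldl_cons]; exact ih _ (hf _ _ h)

-- the indices of xs holding value v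
def pvIdx (xs : List Int) (v : Int) : List Nat :=
  (List.range xs.length).filter (fun i => xs.getD i 0 = v)

theorem pv_mem_idx (xs : List Int) (v : Int) (i : Nat) :
    i ∈ pvIdx xs v ↔ i < xs.length ∧ xs.getD i 0 = v := by
  simp [pvIdx, List.mem_filter, List.mem_range]

theorem pv_nodup_idx (xs : List Int) (v : Int) : (pvIdx xs v).Nodup :=
  (List.nodup_range).filter _

theorem pv_length_idx (xs : List Int) (v : Int) : (pvIdx xs v).length = xs.count v := by
  unfold pvIdx
  induction xs using List.reverseRecOn with
  | nil => simp
  | append_singleton ys y ih =>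
    rw [List.length_append, List.length_singleton, List.range_succ, List.filter_append,
        List.length_append, List.count_append]
    have h1 : List.filter (fun i => decide ((ys ++ [y]).getD i 0 = v)) (List.range ys.length)
        = List.filter (fun i => decide (ys.getD i 0 = v)) (List.range ys.length) := by
      apply List.filter_congr
      intro i hi
      rw [List.mem_range] at hi
      rw [List.getD_append _ _ _ _ hi]
    rw [h1, ih]
    have h2 : (ys ++ [y]).getD ys.length 0 = y := by
      rw [List.getD_eq_getElem _ _ (by simp)]
      simp
    simp only [List.filter_singleton, h2, List.count_singleton]
    by_cases h : y = v
    · subst h; simp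
    · simp [h, beq_iff_eq]

theorem pv_sub_len (l sub : List Nat) (h1 : sub.Nodup) (h2 : sub ⊆ l) : sub.length ≤ l.length :=
  (List.subperm_of_subset h1 h2).length_le

theorem pv_exists_ne_one (l : List Nat) (hl : l.Nodup) (i : Nat)
    (h : 1 + (if i ∈ l then 1 else 0) ≤ l.length) : ∃ j ∈ l, j ≠ i := by
  have hlen : 1 ≤ (l.erase i).length := by
    rw [List.length_erase]
    split_ifs at h ⊢ <;> omega
  obtain ⟨j, hj⟩ := List.exists_mem_of_length_pos (l := l.erase i) (by omega)
  have hm := (hl.mem_erase_iff).1 hj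
  exact ⟨j, hm.2, hm.1⟩

theorem pv_exists_ne_two (l : List Nat) (hl : l.Nodup) (i j : Nat) (hij : i ≠ j)
    (h : 1 + (if i ∈ l then 1 else 0) + (if j ∈ l then 1 else 0) ≤ l.length) :
    ∃ k ∈ l, k ≠ i ∧ k ≠ j := by
  have hnd : (l.erase i).Nodup := hl.erase i
  have hmj : (j ∈ l.erase i) ↔ j ∈ l := by
    rw [hl.mem_erase_iff]
    exact and_iff_right (Ne.symm hij)
  have hlen : 1 ≤ ((l.erase i).erase j).length := by
    rw [List.length_erase, List.length_erase]
    simp only [hmj]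
    by_cases h1 : i ∈ l <;> by_cases h2 : j ∈ l <;> simp [h1, h2] at h ⊢ <;> omega
  obtain ⟨k, hk⟩ := List.exists_mem_of_length_pos (l := (l.erase i).erase j) (by omega)
  have h2 := (hnd.mem_erase_iff).1 hk
  have h3 := (hl.mem_erase_iff).1 h2.2
  exact ⟨k, h3.2, h3.1, h2.1⟩

-- the combinatorial heart: a triple of distinct indices with given values exists
-- iff the value multiset {a,b,c} fits into the counts of xs
theorem pv_central (xs : List Int) (a b c : Int) :
    (∃ i j k : Nat, i < xs.length ∧ j < xs.length ∧ k < xs.length ∧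
       i ≠ j ∧ i ≠ k ∧ j ≠ k ∧ xs.getD i 0 = a ∧ xs.getD j 0 = b ∧ xs.getD k 0 = c)
    ↔ (a ∈ xs ∧ b ∈ xs ∧ c ∈ xs ∧
       1 + (if b = a then 1 else 0) ≤ xs.count b ∧
       1 + (if c = a then 1 else 0) + (if c = b then 1 else 0) ≤ xs.count c) := by
  constructor
  · rintro ⟨i, j, k, hi, hj, hk, hij, hik, hjk, ha, hb, hc⟩
    have hmem : ∀ (m : Nat) (v : Int), m < xs.length → xs.getD m 0 = v → v ∈ xs := by
      intro m v hm hv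
      rw [List.getD_eq_getElem _ _ hm] at hv
      exact hv ▸ List.getElem_mem hm
    refine ⟨hmem i a hi ha, hmem j b hj hb, hmem k c hk hc, ?_, ?_⟩
    · rw [← pv_length_idx]
      by_cases hba : b = a
      · have hsub : [j, i] ⊆ pvIdx xs b := by
          intro m hm
          simp only [List.mem_cons, List.not_mem_nil, or_false] at hm
          rcases hm with rfl | rfl
          · exact (pv_mem_idx ..).2 ⟨hj, hb⟩
          · exact (pv_mem_idx ..).2 ⟨hi, by rw [ha, hba]⟩
        have hle := pv_sub_len _ [j, i] (by simp [hij.symm]) hsub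
        simp at hle; rw [if_pos hba]; omega
      · have hle := pv_sub_len _ [j]
          (by simp)
          (by intro m hm
              simp only [List.mem_cons, List.not_mem_nil, or_false] at hm
              subst hm; exact (pv_mem_idx ..).2 ⟨hj, hb⟩)
        simp at hle; rw [if_neg hba]; omega
    · rw [← pv_length_idx]
      have hkm : k ∈ pvIdx xs c := (pv_mem_idx ..).2 ⟨hk, hc⟩
      have him : c = a → i ∈ pvIdx xs c := fun h => (pv_mem_idx ..).2 ⟨hi, by rw [ha, h]⟩
      have hjm : c = b → j ∈ pvIdx xs c := fun h => (pv_mem_idx ..).2 ⟨hj, by rw [hb, h]⟩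
      by_cases hca : c = a <;> by_cases hcb : c = b
      · have hle := pv_sub_len _ [k, i, j]
          (by simp [Ne.symm hik, Ne.symm hjk, hij])
          (by intro m hm
              simp only [List.mem_cons, List.not_mem_nil, or_false] at hm
              rcases hm with rfl | rfl | rfl
              · exact hkm
              · exact him hca
              · exact hjm hcb)
        simp at hle; rw [if_pos hca, if_pos hcb]; omega
      · have hle := pv_sub_len _ [k, i]
          (by simp [Ne.symm hik])
          (by intro m hm
              simp only [List.mem_cons, List.not_mem_nil, or_false] at hm
              rcases hm with rfl | rfl
              · exact hkm
              · exact him hca)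
        simp at hle; rw [if_pos hca, if_neg hcb]; omega
      · have hle := pv_sub_len _ [k, j]
          (by simp [Ne.symm hjk])
          (by intro m hm
              simp only [List.mem_cons, List.not_mem_nil, or_false] at hm
              rcases hm with rfl | rfl
              · exact hkm
              · exact hjm hcb)
        simp at hle; rw [if_neg hca, if_pos hcb]; omega
      · have hle := pv_sub_len _ [k]
          (by simp)
          (by intro m hm
              simp only [List.mem_cons, List.not_mem_nil, or_false] at hm
              subst hm; exact hkm)
        simp at hle; rw [if_neg hca, if_neg hcb]; omega
  · rintro ⟨ha, hb, hc, hcb, hcc⟩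
    obtain ⟨i, hi, hgi⟩ := List.mem_iff_getElem.1 ha
    have hgi' : xs.getD i 0 = a := by rw [List.getD_eq_getElem _ _ hi]; exact hgi
    have hjex : ∃ j ∈ pvIdx xs b, j ≠ i := by
      apply pv_exists_ne_one _ (pv_nodup_idx ..)
      rw [pv_length_idx]
      have hmi : (i ∈ pvIdx xs b) ↔ b = a := by
        rw [pv_mem_idx]
        constructor
        · rintro ⟨-, h⟩; rw [← h, hgi']
        · intro h; exact ⟨hi, by rw [hgi', h]⟩
      simp only [hmi]
      exact hcb
    obtain ⟨j, hjm, hji⟩ := hjex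
    obtain ⟨hj, hgj⟩ := (pv_mem_idx ..).1 hjm
    have hkex : ∃ k ∈ pvIdx xs c, k ≠ i ∧ k ≠ j := by
      apply pv_exists_ne_two _ (pv_nodup_idx ..) i j (Ne.symm hji)
      rw [pv_length_idx]
      have h1 : (i ∈ pvIdx xs c) ↔ c = a := by
        rw [pv_mem_idx]
        constructor
        · rintro ⟨-, h⟩; rw [← h, hgi']
        · intro h; exact ⟨hi, by rw [hgi', h]⟩
      have h2 : (j ∈ pvIdx xs c) ↔ c = b := by
        rw [pv_mem_idx]
        constructor
        · rintro ⟨-, h⟩; rw [← h, hgj]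
        · intro h; exact ⟨hj, by rw [hgj, h]⟩
      simp only [h1, h2]
      exact hcc
    obtain ⟨k, hkm, hki, hkj⟩ := hkex
    obtain ⟨hk, hgk⟩ := (pv_mem_idx ..).1 hkm
    exact ⟨i, j, k, hi, hj, hk, Ne.symm hji, Ne.symm hki, Ne.symm hkj, hgi', hgj, hgk⟩

theorem pv_memA (digits : List Int) (x : Int) :
    x ∈ ((PySem.List.pyRange 0 (digits.length : Int) 1).foldl (fun s1 i =>
      if PySem.List.pyGetD digits i 0 = 0 then s1 else
      (PySem.List.pyRange 0 (digits.length : Int) 1).foldl (fun s2 j =>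
        if i = j then s2 else
        (PySem.List.pyRange 0 (digits.length : Int) 1).foldl (fun s3 k =>
          if i = k ∨ j = k then s3 else
          let num := PySem.List.pyGetD digits i 0 * 100 + PySem.List.pyGetD digits j 0 * 10 + PySem.List.pyGetD digits k 0
          if PySem.Int.mod num 2 = 0 then PySem.Set.add s3 num else s3) s2) s1)
      PySem.Set.empty)
    ↔ ∃ i j k : Nat, i < digits.length ∧ j < digits.length ∧ k < digits.length ∧
        i ≠ j ∧ i ≠ k ∧ j ≠ k ∧ digits.getD i 0 ≠ 0 ∧
        PySem.Int.mod (digits.getD i 0 * 100 + digits.getD j 0 * 10 + digits.getD k 0) 2 = 0 ∧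
        x = digits.getD i 0 * 100 + digits.getD j 0 * 10 + digits.getD k 0 := by
  have h3 : ∀ (i j : Int) (s : List Int) (y : Int),
      y ∈ (PySem.List.pyRange 0 (digits.length : Int) 1).foldl (fun s3 k =>
          if i = k ∨ j = k then s3 else
          let num := PySem.List.pyGetD digits i 0 * 100 + PySem.List.pyGetD digits j 0 * 10 + PySem.List.pyGetD digits k 0
          if PySem.Int.mod num 2 = 0 then PySem.Set.add s3 num else s3) s ↔
      y ∈ s ∨ ∃ k ∈ PySem.List.pyRange 0 (digits.length : Int) 1, ¬(i = k ∨ j = k) ∧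
        PySem.Int.mod (PySem.List.pyGetD digits i 0 * 100 + PySem.List.pyGetD digits j 0 * 10 + PySem.List.pyGetD digits k 0) 2 = 0 ∧
        y = PySem.List.pyGetD digits i 0 * 100 + PySem.List.pyGetD digits j 0 * 10 + PySem.List.pyGetD digits k 0 := by
    intro i j s y
    apply pv_mem_foldl_iff
    intro s' k y'
    by_cases hk : i = k ∨ j = k
    · simp [hk]
    · simp only [if_neg hk]
      by_cases he : PySem.Int.mod (PySem.List.pyGetD digits i 0 * 100 + PySem.List.pyGetD digits j 0 * 10 + PySem.List.pyGetD digits k 0) 2 = 0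
      · rw [PySem.Int.mod_eq_zero_iff_dvd] at he
        simp [hk, he, PySem.Set.mem_add]
      · rw [PySem.Int.mod_eq_zero_iff_dvd] at he
        simp [hk, he]
  have h2 : ∀ (i : Int) (s : List Int) (y : Int),
      y ∈ (PySem.List.pyRange 0 (digits.length : Int) 1).foldl (fun s2 j =>
        if i = j then s2 else
        (PySem.List.pyRange 0 (digits.length : Int) 1).foldl (fun s3 k =>
          if i = k ∨ j = k then s3 else
          let num := PySem.List.pyGetD digits i 0 * 100 + PySem.List.pyGetD digits j 0 * 10 + PySem.List.pyGetD digits k 0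
          if PySem.Int.mod num 2 = 0 then PySem.Set.add s3 num else s3) s2) s ↔
      y ∈ s ∨ ∃ j ∈ PySem.List.pyRange 0 (digits.length : Int) 1, ¬ i = j ∧
        ∃ k ∈ PySem.List.pyRange 0 (digits.length : Int) 1, ¬(i = k ∨ j = k) ∧
        PySem.Int.mod (PySem.List.pyGetD digits i 0 * 100 + PySem.List.pyGetD digits j 0 * 10 + PySem.List.pyGetD digits k 0) 2 = 0 ∧
        y = PySem.List.pyGetD digits i 0 * 100 + PySem.List.pyGetD digits j 0 * 10 + PySem.List.pyGetD digits k 0 := by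
    intro i s y
    apply pv_mem_foldl_iff
    intro s' j y'
    by_cases hj : i = j
    · simp [hj]
    · rw [if_neg hj, h3]; simp [hj]
  have h1 := pv_mem_foldl_iff
    (f := fun s1 i =>
      if PySem.List.pyGetD digits i 0 = 0 then s1 else
      (PySem.List.pyRange 0 (digits.length : Int) 1).foldl (fun s2 j =>
        if i = j then s2 else
        (PySem.List.pyRange 0 (digits.length : Int) 1).foldl (fun s3 k =>
          if i = k ∨ j = k then s3 else
          let num := PySem.List.pyGetD digits i 0 * 100 + PySem.List.pyGetD digits j 0 * 10 + PySem.List.pyGetD digits k 0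
          if PySem.Int.mod num 2 = 0 then PySem.Set.add s3 num else s3) s2) s1)
    (Q := fun i y => ¬ PySem.List.pyGetD digits i 0 = 0 ∧
      ∃ j ∈ PySem.List.pyRange 0 (digits.length : Int) 1, ¬ i = j ∧
      ∃ k ∈ PySem.List.pyRange 0 (digits.length : Int) 1, ¬(i = k ∨ j = k) ∧
        PySem.Int.mod (PySem.List.pyGetD digits i 0 * 100 + PySem.List.pyGetD digits j 0 * 10 + PySem.List.pyGetD digits k 0) 2 = 0 ∧
        y = PySem.List.pyGetD digits i 0 * 100 + PySem.List.pyGetD digits j 0 * 10 + PySem.List.pyGetD digits k 0)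
    (by intro s' i y'
        dsimp only
        by_cases hi : PySem.List.pyGetD digits i 0 = 0
        · simp [hi]
        · rw [if_neg hi, h2]; simp [hi])
    (PySem.List.pyRange 0 (digits.length : Int) 1) PySem.Set.empty x
  rw [h1]
  simp only [show (PySem.Set.empty : List Int) = [] from rfl, List.not_mem_nil, false_or,
    PySem.List.mem_pyRange_one]
  constructor
  · rintro ⟨i, ⟨hi0, hin⟩, hne, j, ⟨hj0, hjn⟩, hij, k, ⟨hk0, hkn⟩, hguard, heven, hx⟩
    rw [not_or] at hguard
    refine ⟨i.toNat, j.toNat, k.toNat, by omega, by omega, by omega, by omega, by omega, by omega, ?_, ?_, ?_⟩ <;>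
    · have ei : i = ((i.toNat : Nat) : Int) := by omega
      have ej : j = ((j.toNat : Nat) : Int) := by omega
      have ek : k = ((k.toNat : Nat) : Int) := by omega
      rw [ei] at hne
      rw [ei, ej, ek] at heven hx
      simp only [PySem.List.pyGetD_natCast] at hne heven hx
      first | exact hne | exact heven | exact hx
  · rintro ⟨i, j, k, hi, hj, hk, hij, hik, hjk, hne, heven, hx⟩
    refine ⟨(i : Int), ⟨by omega, by omega⟩, ?_, (j : Int), ⟨by omega, by omega⟩, by omega, (k : Int), ⟨by omega, by omega⟩, by omega, ?_, ?_⟩ <;>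
      simp only [PySem.List.pyGetD_natCast] <;>
      first | exact hne | exact heven | exact hx

theorem pv_memB (digits : List Int) (x : Int) :
    x ∈ ((PySem.Dict.counter digits).keys.foldl (fun s1 a =>
      if a = 0 then s1 else
      (PySem.Dict.counter digits).keys.foldl (fun s2 b =>
        if (PySem.Dict.counter digits).getD b 0 - (if b = a then 1 else 0) < 1 then s2 else
        (PySem.Dict.counter digits).keys.foldl (fun s3 c =>
          if (PySem.Dict.counter digits).getD c 0 - (if c = a then 1 else 0) - (if c = b then 1 else 0) < 1 then s3 else
          let num := a * 100 + b * 10 + c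
          if PySem.Int.mod num 2 = 0 then PySem.Set.add s3 num else s3) s2) s1)
      PySem.Set.empty)
    ↔ ∃ a ∈ digits, a ≠ 0 ∧ ∃ b ∈ digits, 1 + (if b = a then 1 else 0) ≤ digits.count b ∧
        ∃ c ∈ digits, 1 + (if c = a then 1 else 0) + (if c = b then 1 else 0) ≤ digits.count c ∧
        PySem.Int.mod (a * 100 + b * 10 + c) 2 = 0 ∧
        x = a * 100 + b * 10 + c := by
  have h3 : ∀ (a b : Int) (s : List Int) (y : Int),
      y ∈ (PySem.Dict.counter digits).keys.foldl (fun s3 c =>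
          if (PySem.Dict.counter digits).getD c 0 - (if c = a then 1 else 0) - (if c = b then 1 else 0) < 1 then s3 else
          let num := a * 100 + b * 10 + c
          if PySem.Int.mod num 2 = 0 then PySem.Set.add s3 num else s3) s ↔
      y ∈ s ∨ ∃ c ∈ (PySem.Dict.counter digits).keys,
        ¬((PySem.Dict.counter digits).getD c 0 - (if c = a then 1 else 0) - (if c = b then 1 else 0) < 1) ∧
        PySem.Int.mod (a * 100 + b * 10 + c) 2 = 0 ∧ y = a * 100 + b * 10 + c := by
    intro a b s y
    apply pv_mem_foldl_iff
    intro s' c y'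
    by_cases hg : (PySem.Dict.counter digits).getD c 0 - (if c = a then 1 else 0) - (if c = b then 1 else 0) < 1 <;>
      have hg2 := hg <;> simp only [PySem.Dict.getD_counter] at hg2
    · rw [if_pos hg]; simp [hg2]
    · rw [if_neg hg]
      by_cases he : PySem.Int.mod (a * 100 + b * 10 + c) 2 = 0
      · rw [PySem.Int.mod_eq_zero_iff_dvd] at he
        simp [hg2, he, PySem.Set.mem_add]
      · rw [PySem.Int.mod_eq_zero_iff_dvd] at he
        simp [hg2, he]
  have h2 : ∀ (a : Int) (s : List Int) (y : Int),
      y ∈ (PySem.Dict.counter digits).keys.foldl (fun s2 b =>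
        if (PySem.Dict.counter digits).getD b 0 - (if b = a then 1 else 0) < 1 then s2 else
        (PySem.Dict.counter digits).keys.foldl (fun s3 c =>
          if (PySem.Dict.counter digits).getD c 0 - (if c = a then 1 else 0) - (if c = b then 1 else 0) < 1 then s3 else
          let num := a * 100 + b * 10 + c
          if PySem.Int.mod num 2 = 0 then PySem.Set.add s3 num else s3) s2) s ↔
      y ∈ s ∨ ∃ b ∈ (PySem.Dict.counter digits).keys,
        ¬((PySem.Dict.counter digits).getD b 0 - (if b = a then 1 else 0) < 1) ∧
        ∃ c ∈ (PySem.Dict.counter digits).keys,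
        ¬((PySem.Dict.counter digits).getD c 0 - (if c = a then 1 else 0) - (if c = b then 1 else 0) < 1) ∧
        PySem.Int.mod (a * 100 + b * 10 + c) 2 = 0 ∧ y = a * 100 + b * 10 + c := by
    intro a s y
    apply pv_mem_foldl_iff
    intro s' b y'
    by_cases hg : (PySem.Dict.counter digits).getD b 0 - (if b = a then 1 else 0) < 1 <;>
      have hg2 := hg <;> simp only [PySem.Dict.getD_counter] at hg2
    · rw [if_pos hg]; simp [hg2]
    · rw [if_neg hg, h3]; simp [hg2]
  have h1 := pv_mem_foldl_iff
    (f := fun s1 a =>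
      if a = 0 then s1 else
      (PySem.Dict.counter digits).keys.foldl (fun s2 b =>
        if (PySem.Dict.counter digits).getD b 0 - (if b = a then 1 else 0) < 1 then s2 else
        (PySem.Dict.counter digits).keys.foldl (fun s3 c =>
          if (PySem.Dict.counter digits).getD c 0 - (if c = a then 1 else 0) - (if c = b then 1 else 0) < 1 then s3 else
          let num := a * 100 + b * 10 + c
          if PySem.Int.mod num 2 = 0 then PySem.Set.add s3 num else s3) s2) s1)
    (Q := fun a y => ¬ a = 0 ∧ ∃ b ∈ (PySem.Dict.counter digits).keys,
        ¬((PySem.Dict.counter digits).getD b 0 - (if b = a then 1 else 0) < 1) ∧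
        ∃ c ∈ (PySem.Dict.counter digits).keys,
        ¬((PySem.Dict.counter digits).getD c 0 - (if c = a then 1 else 0) - (if c = b then 1 else 0) < 1) ∧
        PySem.Int.mod (a * 100 + b * 10 + c) 2 = 0 ∧ y = a * 100 + b * 10 + c)
    (by intro s' a y'
        dsimp only
        by_cases ha : a = 0
        · simp [ha]
        · rw [if_neg ha, h2]; simp [ha])
    (PySem.Dict.counter digits).keys PySem.Set.empty x
  rw [h1]
  have hc1 : ∀ (v w : Int) (n : Nat), (¬ ((n : Int) - (if v = w then 1 else 0) < 1)) ↔
      1 + (if v = w then 1 else 0) ≤ n := by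
    intro v w n; split_ifs <;> omega
  have hc2 : ∀ (v w u : Int) (n : Nat), (¬ ((n : Int) - (if v = w then 1 else 0) - (if v = u then 1 else 0) < 1)) ↔
      1 + (if v = w then 1 else 0) + (if v = u then 1 else 0) ≤ n := by
    intro v w u n; split_ifs <;> omega
  simp only [show (PySem.Set.empty : List Int) = [] from rfl, List.not_mem_nil, false_or,
    PySem.Dict.keys_counter, PySem.Set.mem_ofList, PySem.Dict.getD_counter, hc1, hc2, ne_eq]


theorem pv_bridge (digits : List Int) (x : Int) :
    (∃ i j k : Nat, i < digits.length ∧ j < digits.length ∧ k < digits.length ∧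
        i ≠ j ∧ i ≠ k ∧ j ≠ k ∧ digits.getD i 0 ≠ 0 ∧
        PySem.Int.mod (digits.getD i 0 * 100 + digits.getD j 0 * 10 + digits.getD k 0) 2 = 0 ∧
        x = digits.getD i 0 * 100 + digits.getD j 0 * 10 + digits.getD k 0)
    ↔ (∃ a ∈ digits, a ≠ 0 ∧ ∃ b ∈ digits, 1 + (if b = a then 1 else 0) ≤ digits.count b ∧
        ∃ c ∈ digits, 1 + (if c = a then 1 else 0) + (if c = b then 1 else 0) ≤ digits.count c ∧
        PySem.Int.mod (a * 100 + b * 10 + c) 2 = 0 ∧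
        x = a * 100 + b * 10 + c) := by
  constructor
  · rintro ⟨i, j, k, hi, hj, hk, hij, hik, hjk, hne, heven, hx⟩
    have hcent := (pv_central digits (digits.getD i 0) (digits.getD j 0) (digits.getD k 0)).mp
      ⟨i, j, k, hi, hj, hk, hij, hik, hjk, rfl, rfl, rfl⟩
    exact ⟨_, hcent.1, hne, _, hcent.2.1, hcent.2.2.2.1, _, hcent.2.2.1, hcent.2.2.2.2, heven, hx⟩
  · rintro ⟨a, ha, hane, b, hb, hcb, c, hc, hcc, heven, hx⟩
    obtain ⟨i, j, k, hi, hj, hk, hij, hik, hjk, ga, gb, gc⟩ :=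
      (pv_central digits a b c).mpr ⟨ha, hb, hc, hcb, hcc⟩
    exact ⟨i, j, k, hi, hj, hk, hij, hik, hjk,
      by rw [ga]; exact hane, by rw [ga, gb, gc]; exact heven, by rw [ga, gb, gc]; exact hx⟩

-- ===== VERDICT (by name: the statement is the Claim_ definition above) =====
theorem findEvenNumbers1_spec : Claim_equal_findEvenNumbers1 := by
  intro digits _
  unfold Spec_findEvenNumbers1
  simp only [findEvenNumbers1, findEvenNumbers1_alt]
  rw [PySem.Dict.foldl_insert_getD_add_one_eq_counter]
  have hnA : ((PySem.List.pyRange 0 (digits.length : Int) 1).foldl (fun s1 i =>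
      if PySem.List.pyGetD digits i 0 = 0 then s1 else
      (PySem.List.pyRange 0 (digits.length : Int) 1).foldl (fun s2 j =>
        if i = j then s2 else
        (PySem.List.pyRange 0 (digits.length : Int) 1).foldl (fun s3 k =>
          if i = k ∨ j = k then s3 else
          let num := PySem.List.pyGetD digits i 0 * 100 + PySem.List.pyGetD digits j 0 * 10 + PySem.List.pyGetD digits k 0
          if PySem.Int.mod num 2 = 0 then PySem.Set.add s3 num else s3) s2) s1)
      PySem.Set.empty).Nodup := by
    apply pv_nodup_foldl
    · intro s i hs
      dsimp only
      by_cases h1 : PySem.List.pyGetD digits i 0 = 0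
      · rw [if_pos h1]; exact hs
      · rw [if_neg h1]
        apply pv_nodup_foldl
        · intro s' j hs'
          dsimp only
          by_cases h2 : i = j
          · rw [if_pos h2]; exact hs'
          · rw [if_neg h2]
            apply pv_nodup_foldl
            · intro s'' k hs''
              dsimp only
              split_ifs with h3 h4
              · exact hs''
              · exact PySem.Set.nodup_add _ _ hs''
              · exact hs''
            · exact hs'
        · exact hs
    · exact List.nodup_nil
  have hnB : ((PySem.Dict.counter digits).keys.foldl (fun s1 a =>
      if a = 0 then s1 else
      (PySem.Dict.counter digits).keys.foldl (fun s2 b =>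
        if (PySem.Dict.counter digits).getD b 0 - (if b = a then 1 else 0) < 1 then s2 else
        (PySem.Dict.counter digits).keys.foldl (fun s3 c =>
          if (PySem.Dict.counter digits).getD c 0 - (if c = a then 1 else 0) - (if c = b then 1 else 0) < 1 then s3 else
          let num := a * 100 + b * 10 + c
          if PySem.Int.mod num 2 = 0 then PySem.Set.add s3 num else s3) s2) s1)
      PySem.Set.empty).Nodup := by
    apply pv_nodup_foldl
    · intro s a hs
      dsimp only
      by_cases h1 : a = 0
      · rw [if_pos h1]; exact hs
      · rw [if_neg h1]
        apply pv_nodup_foldl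
        · intro s' b hs'
          dsimp only
          by_cases h2 : (PySem.Dict.counter digits).getD b 0 - (if b = a then 1 else 0) < 1
          · rw [if_pos h2]; exact hs'
          · rw [if_neg h2]
            apply pv_nodup_foldl
            · intro s'' c hs''
              dsimp only
              by_cases h3 : (PySem.Dict.counter digits).getD c 0 - (if c = a then 1 else 0) - (if c = b then 1 else 0) < 1
              · rw [if_pos h3]; exact hs''
              · rw [if_neg h3]
                by_cases h4 : PySem.Int.mod (a * 100 + b * 10 + c) 2 = 0
                · rw [if_pos h4]; exact PySem.Set.nodup_add _ _ hs''
                · rw [if_neg h4]; exact hs''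
            · exact hs'
        · exact hs
    · exact List.nodup_nil
  apply PySem.List.sorted_eq_sorted_of_perm _ _ _ (fun x y h => h)
  rw [List.perm_ext_iff_of_nodup hnA hnB]
  intro x
  rw [pv_memA, pv_memB]
  exact pv_bridge digits x
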